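-- pv_equiv track=rewrite | github.com/amoilanen/advent-of-code-2025 | internal/days/day12/day12.py | can_place_at
-- ===== SOURCE A (Python) =====
-- from typing import Dict, List, Tuple, Set
--
-- def can_place_at(occupied: Set[Tuple[int, int]], shape: Set[Tuple[int, int]],
--                  start_row: int, start_col: int, width: int, height: int) -> bool:
--     """
--     Check if a shape can be placed at a given position.
--
--     Args:
--         occupied: Set of occupied (row, col) positions
--         shape: Set of (row, col) coordinates relative to shape's origin
--         start_row: Row position to place the shape's origin
--         start_col: Column position to place the shape's origin
--         width: Grid width
--         height: Grid height
--
--     Returns: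
--         True if the shape can be placed, False otherwise
--     """
--     for dr, dc in shape:
--         r, c = start_row + dr, start_col + dc
--
--         # Check bounds
--         if r < 0 or r >= height or c < 0 or c >= width:
--             return False
--
--         # Check if cell is already occupied
--         if (r, c) in occupied:
--             return False
--
--     return True
-- ===== SOURCE B (Python) =====
-- def can_place_at(occupied, shape, start_row, start_col, width, height):
--     # Bounds by extremes: row and column constraints are separable, so the whole
--     # shape is in bounds iff the four extreme offsets are.  Occupancy is checked
--     # in the reverse direction: translate each OCCUPIED cell back into shape
--     # space and test shape membership.
--     if not shape:
--         return True
--     min_dr = min(dr for dr, _ in shape)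
--     max_dr = max(dr for dr, _ in shape)
--     min_dc = min(dc for _, dc in shape)
--     max_dc = max(dc for _, dc in shape)
--     if start_row + min_dr < 0 or start_row + max_dr >= height:
--         return False
--     if start_col + min_dc < 0 or start_col + max_dc >= width:
--         return False
--     shape_set = set(shape)
--     return all((r - start_row, c - start_col) not in shape_set for r, c in occupied)
-- ===== Notes on version B (the rewrite author's own statement) =====
-- stated objective: alternative
-- what changed: B replaces A's per-cell interleaved bounds-and-occupancy loop over the shape by an aggregate bounds test on the four extreme offsets (min/max of row and column offsets, correct because the constraints are separable) and an occupancy scan in the reverse direction over the occupied set, translating occupied cells back into shape space and testing shape membership.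
import Mathlib
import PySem

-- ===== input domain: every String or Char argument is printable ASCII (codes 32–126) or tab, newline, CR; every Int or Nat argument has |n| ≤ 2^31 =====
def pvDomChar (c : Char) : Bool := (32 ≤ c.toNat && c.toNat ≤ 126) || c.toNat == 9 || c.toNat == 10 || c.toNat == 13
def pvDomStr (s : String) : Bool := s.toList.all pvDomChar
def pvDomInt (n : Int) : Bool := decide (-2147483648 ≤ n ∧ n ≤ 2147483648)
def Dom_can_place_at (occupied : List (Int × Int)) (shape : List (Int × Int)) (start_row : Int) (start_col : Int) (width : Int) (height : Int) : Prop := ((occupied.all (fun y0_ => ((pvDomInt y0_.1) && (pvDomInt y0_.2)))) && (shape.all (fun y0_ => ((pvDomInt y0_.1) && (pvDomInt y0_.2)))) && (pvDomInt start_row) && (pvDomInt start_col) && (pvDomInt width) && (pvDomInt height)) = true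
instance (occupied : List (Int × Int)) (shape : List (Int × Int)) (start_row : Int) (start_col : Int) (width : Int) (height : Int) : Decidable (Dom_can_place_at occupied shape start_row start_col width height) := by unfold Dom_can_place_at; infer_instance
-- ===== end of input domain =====

-- ===== PORT A =====
-- B replaces A's per-cell interleaved bounds/occupancy loop by an aggregate
-- min/max-extremes bounds test plus a reverse-direction scan over the occupied
-- cells (objective: alternative).
def can_place_at (occupied : List (Int × Int)) (shape : List (Int × Int)) (start_row : Int) (start_col : Int) (width : Int) (height : Int) : Bool :=
  match shape with
  | [] => true
  | (dr, dc) :: rest =>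
    let r := start_row + dr
    let c := start_col + dc
    if r < 0 || r ≥ height || c < 0 || c ≥ width then false
    else if occupied.contains (r, c) then false
    else can_place_at occupied rest start_row start_col width height

-- ===== PORT B =====
def can_place_at_alt (occupied : List (Int × Int)) (shape : List (Int × Int)) (start_row : Int) (start_col : Int) (width : Int) (height : Int) : Bool :=
  match shape with
  | [] => true
  | (dr0, dc0) :: rest =>
    let min_dr := rest.foldl (fun m p => min m p.1) dr0
    let max_dr := rest.foldl (fun m p => max m p.1) dr0
    let min_dc := rest.foldl (fun m p => min m p.2) dc0
    let max_dc := rest.foldl (fun m p => max m p.2) dc0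
    if start_row + min_dr < 0 || start_row + max_dr ≥ height then false
    else if start_col + min_dc < 0 || start_col + max_dc ≥ width then false
    else
      let shape_set : PySem.Set (Int × Int) := PySem.Set.ofList ((dr0, dc0) :: rest)
      occupied.all (fun rc => !(shape_set.contains (rc.1 - start_row, rc.2 - start_col)))

-- ===== PRECONDITION & SPEC =====
def Spec_can_place_at (occupied : List (Int × Int)) (shape : List (Int × Int)) (start_row : Int) (start_col : Int) (width : Int) (height : Int) (out : Bool) : Prop := out = can_place_at_alt occupied shape start_row start_col width height
instance (occupied : List (Int × Int)) (shape : List (Int × Int)) (start_row : Int) (start_col : Int) (width : Int) (height : Int) (out : Bool) : Decidable (Spec_can_place_at occupied shape start_row start_col width height out) := by unfold Spec_can_place_at; infer_instance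

-- ===== CLAIM (what is proved, stated in full; the proofs are below) =====
def Claim_equal_can_place_at : Prop := ∀ (occupied : List (Int × Int)) (shape : List (Int × Int)) (start_row : Int) (start_col : Int) (width : Int) (height : Int), Dom_can_place_at occupied shape start_row start_col width height → Spec_can_place_at occupied shape start_row start_col width height (can_place_at occupied shape start_row start_col width height)

-- ===== LEMMAS AND PROOFS =====

-- A returns the all-over-shape of the combined per-cell check.
theorem can_place_at_eq_all (occupied shape : List (Int × Int)) (sr sc w h : Int) :
    can_place_at occupied shape sr sc w h =
      shape.all (fun p =>
        !(decide (sr + p.1 < 0) || decide (sr + p.1 ≥ h) || decide (sc + p.2 < 0) || decide (sc + p.2 ≥ w))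
        && !(occupied.contains (sr + p.1, sc + p.2))) := by
  induction shape with
  | nil => rfl
  | cons hd tl ih =>
    obtain ⟨dr, dc⟩ := hd
    simp only [can_place_at, List.all_cons, ih]
    by_cases hb : (sr + dr < 0 ∨ sr + dr ≥ h ∨ sc + dc < 0 ∨ sc + dc ≥ w)
    · rcases hb with h1 | h1 | h1 | h1 <;> simp [h1]
    · push Not at hb
      obtain ⟨h1, h2, h3, h4⟩ := hb
      simp [not_lt.mpr h1, not_lt.mpr h3, not_le.mpr h2, not_le.mpr h4, Bool.and_assoc]

-- foldl min: a lower bound of x and every list element, and attained.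
theorem foldl_min_le (l : List (Int × Int)) (f : Int × Int → Int) (x : Int) :
    l.foldl (fun m p => min m (f p)) x ≤ x ∧ ∀ p ∈ l, l.foldl (fun m p => min m (f p)) x ≤ f p := by
  induction l generalizing x with
  | nil => simp
  | cons hd tl ih =>
    obtain ⟨h1, h2⟩ := ih (min x (f hd))
    refine ⟨le_trans h1 (min_le_left _ _), ?_⟩
    intro p hp
    rcases List.mem_cons.mp hp with rfl | hp
    · exact le_trans h1 (min_le_right _ _)
    · exact h2 p hp

theorem foldl_min_mem (l : List (Int × Int)) (f : Int × Int → Int) (x : Int) :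
    l.foldl (fun m p => min m (f p)) x = x ∨ ∃ p ∈ l, l.foldl (fun m p => min m (f p)) x = f p := by
  induction l generalizing x with
  | nil => simp
  | cons hd tl ih =>
    rcases ih (min x (f hd)) with heq | ⟨p, hp, heq⟩
    · rcases min_choice x (f hd) with hm | hm
      · exact Or.inl (by rw [List.foldl_cons, heq, hm])
      · exact Or.inr ⟨hd, List.mem_cons_self, by rw [List.foldl_cons, heq, hm]⟩
    · exact Or.inr ⟨p, List.mem_cons_of_mem _ hp, heq⟩

theorem le_foldl_max (l : List (Int × Int)) (f : Int × Int → Int) (x : Int) :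
    x ≤ l.foldl (fun m p => max m (f p)) x ∧ ∀ p ∈ l, f p ≤ l.foldl (fun m p => max m (f p)) x := by
  induction l generalizing x with
  | nil => simp
  | cons hd tl ih =>
    obtain ⟨h1, h2⟩ := ih (max x (f hd))
    refine ⟨le_trans (le_max_left _ _) h1, ?_⟩
    intro p hp
    rcases List.mem_cons.mp hp with rfl | hp
    · exact le_trans (le_max_right _ _) h1
    · exact h2 p hp

theorem foldl_max_mem (l : List (Int × Int)) (f : Int × Int → Int) (x : Int) :
    l.foldl (fun m p => max m (f p)) x = x ∨ ∃ p ∈ l, l.foldl (fun m p => max m (f p)) x = f p := by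
  induction l generalizing x with
  | nil => simp
  | cons hd tl ih =>
    rcases ih (max x (f hd)) with heq | ⟨p, hp, heq⟩
    · rcases max_choice x (f hd) with hm | hm
      · exact Or.inl (by rw [List.foldl_cons, heq, hm])
      · exact Or.inr ⟨hd, List.mem_cons_self, by rw [List.foldl_cons, heq, hm]⟩
    · exact Or.inr ⟨p, List.mem_cons_of_mem _ hp, heq⟩

theorem can_place_at_spec : Claim_equal_can_place_at := by
  intro occupied shape sr sc w h _
  unfold Spec_can_place_at
  rw [can_place_at_eq_all]
  match shape with
  | [] => rfl
  | (dr0, dc0) :: rest =>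
    simp only [can_place_at_alt]
    set min_dr := rest.foldl (fun m p => min m p.1) dr0 with hmindr
    set max_dr := rest.foldl (fun m p => max m p.1) dr0 with hmaxdr
    set min_dc := rest.foldl (fun m p => min m p.2) dc0 with hmindc
    set max_dc := rest.foldl (fun m p => max m p.2) dc0 with hmaxdc
    by_cases hall : ∀ p ∈ (dr0, dc0) :: rest, 0 ≤ sr + p.1 ∧ sr + p.1 < h ∧ 0 ≤ sc + p.2 ∧ sc + p.2 < w
    · -- bounds hold for every cell; both sides reduce to the occupancy check
      have hr1 : ¬ (sr + min_dr < 0) := by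
        rcases foldl_min_mem rest Prod.fst dr0 with heq | ⟨p, hp, heq⟩
        · rw [hmindr, heq]; exact not_lt.mpr (hall (dr0, dc0) List.mem_cons_self).1
        · rw [hmindr, heq]; exact not_lt.mpr (hall p (List.mem_cons_of_mem _ hp)).1
      have hr2 : ¬ (sr + max_dr ≥ h) := by
        rcases foldl_max_mem rest Prod.fst dr0 with heq | ⟨p, hp, heq⟩
        · rw [hmaxdr, heq]; exact not_le.mpr (hall (dr0, dc0) List.mem_cons_self).2.1
        · rw [hmaxdr, heq]; exact not_le.mpr (hall p (List.mem_cons_of_mem _ hp)).2.1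
      have hc1 : ¬ (sc + min_dc < 0) := by
        rcases foldl_min_mem rest Prod.snd dc0 with heq | ⟨p, hp, heq⟩
        · rw [hmindc, heq]; exact not_lt.mpr (hall (dr0, dc0) List.mem_cons_self).2.2.1
        · rw [hmindc, heq]; exact not_lt.mpr (hall p (List.mem_cons_of_mem _ hp)).2.2.1
      have hc2 : ¬ (sc + max_dc ≥ w) := by
        rcases foldl_max_mem rest Prod.snd dc0 with heq | ⟨p, hp, heq⟩
        · rw [hmaxdc, heq]; exact not_le.mpr (hall (dr0, dc0) List.mem_cons_self).2.2.2
        · rw [hmaxdc, heq]; exact not_le.mpr (hall p (List.mem_cons_of_mem _ hp)).2.2.2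
      rw [if_neg (by simp [hr1, hr2]), if_neg (by simp [hc1, hc2])]
      rw [Bool.eq_iff_iff]
      simp only [List.all_eq_true, Bool.and_eq_true, Bool.not_eq_true',
        List.contains_eq_mem, decide_eq_false_iff_not, PySem.Set.contains,
        PySem.Set.mem_ofList]
      constructor
      · rintro hL ⟨r, c⟩ hrc
        intro hmem
        have hocc := (hL _ hmem).2
        have hpair : (sr + (r - sr), sc + (c - sc)) = (r, c) := by
          simp only [Prod.mk.injEq]; omega
        rw [hpair] at hocc
        exact hocc hrc
      · intro hR p hp
        obtain ⟨a1, a2, a3, a4⟩ := hall p hp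
        refine ⟨by simp; omega, ?_⟩
        intro hocc
        have := hR _ hocc
        simp only at this
        exact this (by simpa using hp)
    · -- some cell is out of bounds: both sides are false
      push Not at hall
      obtain ⟨p, hp, hbad⟩ := hall
      have hA : ((dr0, dc0) :: rest).all (fun p =>
          !(decide (sr + p.1 < 0) || decide (sr + p.1 ≥ h) || decide (sc + p.2 < 0) || decide (sc + p.2 ≥ w))
          && !(occupied.contains (sr + p.1, sc + p.2))) = false := by
        rw [List.all_eq_false]
        refine ⟨p, hp, ?_⟩
        have hor : (decide (sr + p.1 < 0) || decide (sr + p.1 ≥ h) || decide (sc + p.2 < 0) || decide (sc + p.2 ≥ w)) = true := by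
          simp only [Bool.or_eq_true, decide_eq_true_eq]; omega
        simp [hor]
      rw [hA]
      have hminle := (foldl_min_le rest Prod.fst dr0)
      have hmaxle := (le_foldl_max rest Prod.fst dr0)
      have hminle' := (foldl_min_le rest Prod.snd dc0)
      have hmaxle' := (le_foldl_max rest Prod.snd dc0)
      have hdr_le : min_dr ≤ p.1 ∧ p.1 ≤ max_dr := by
        rcases List.mem_cons.mp hp with rfl | hp'
        · exact ⟨hminle.1, hmaxle.1⟩
        · exact ⟨hminle.2 p hp', hmaxle.2 p hp'⟩
      have hdc_le : min_dc ≤ p.2 ∧ p.2 ≤ max_dc := by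
        rcases List.mem_cons.mp hp with rfl | hp'
        · exact ⟨hminle'.1, hmaxle'.1⟩
        · exact ⟨hminle'.2 p hp', hmaxle'.2 p hp'⟩
      by_cases h1 : sr + min_dr < 0 ∨ sr + max_dr ≥ h
      · rw [if_pos (by rcases h1 with h1 | h1 <;> simp [h1])]
      · rw [if_neg (by simp only [Bool.or_eq_true, decide_eq_true_eq]; omega)]
        rw [if_pos (by simp only [Bool.or_eq_true, decide_eq_true_eq]; omega)]
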